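-- pv_equiv track=rewrite | github.com/edwin-19/E-Bot | session/nlp/spellChecker/spellcheckers.py | vowelswaps
-- ===== SOURCE A (Python) =====
-- from itertools import product
--
-- vowels = set('aeiouy')
--
-- def vowelswaps(word):
--     """return flat option list of all possible variations of the word by swapping vowels"""
--     word = list(word)
--     # ['h','i'] becomes ['h', ['a', 'e', 'i', 'o', 'u', 'y']]
--     for idx, l in enumerate(word):
--         if type(l) == list:
--             pass
--         elif l in vowels:
--             word[idx] = list(vowels)
--
--      # ['h',['i','ii','iii']] becomes 'hi','hii','hiii'
--     for p in product(*word):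
--          yield ''.join(p)
-- ===== SOURCE B (Python) =====
-- vowels = set('aeiouy')
--
-- def vowelswaps(word):
--     """return flat option list of all possible variations of the word by swapping vowels"""
--     variants = ['']
--     for ch in word:
--         opts = list(vowels) if ch in vowels else [ch]
--         variants = [prefix + opt for prefix in variants for opt in opts]
--     yield from variants
-- ===== Notes on version B (the rewrite author's own statement) =====
-- stated objective: alternative
-- what changed: Replaces the mutate-then-itertools.product pipeline (rewrite the char list in place, expand with product, join each tuple) by a single left-to-right fold that extends a list of prefix strings character by character, with no product and no join.
import Mathlib
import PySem

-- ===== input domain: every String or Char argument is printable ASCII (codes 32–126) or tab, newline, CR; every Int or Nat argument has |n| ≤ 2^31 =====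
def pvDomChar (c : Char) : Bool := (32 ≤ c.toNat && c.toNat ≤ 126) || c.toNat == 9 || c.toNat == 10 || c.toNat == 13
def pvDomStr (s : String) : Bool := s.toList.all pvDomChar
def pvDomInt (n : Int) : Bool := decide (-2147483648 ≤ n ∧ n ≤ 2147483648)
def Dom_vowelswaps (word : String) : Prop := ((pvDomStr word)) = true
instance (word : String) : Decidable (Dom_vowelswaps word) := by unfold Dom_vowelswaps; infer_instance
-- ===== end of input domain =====

-- B replaces mutate-then-itertools.product-then-join by a single prefix-extending fold; the Python
-- outputs are compared as sets, so the ports fix one canonical order ('aeiouy') for list(vowels).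

-- ===== PORT A =====
-- list(vowels): canonical order for the port (Python's set order is hash-dependent; outputs are compared as a set)
def pyVowels : List Char := ['a', 'e', 'i', 'o', 'u', 'y']

-- itertools.product(*word), last position varying fastest
def pyProduct : List (List Char) → List (List Char)
  | [] => [[]]
  | xs :: rest => xs.flatMap (fun x => (pyProduct rest).map (fun t => x :: t))

def vowelswaps (word : String) : List String :=
  -- word = list(word); the 'type(l) == list' branch is dead (elements are 1-char strings); the
  -- enumerate-and-assign loop rewrites each vowel position to list(vowels)
  let w : List (List Char) := word.toList.map (fun l => if pyVowels.contains l then pyVowels else [l])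
  -- for p in product(*word): yield ''.join(p)
  (pyProduct w).map (fun p => String.ofList p)

-- ===== PORT B =====
def vowelOptStrs : List String := ["a", "e", "i", "o", "u", "y"]

def vowelswaps_alt (word : String) : List String :=
  word.toList.foldl
    (fun variants ch =>
      let opts : List String :=
        if pyVowels.contains ch then vowelOptStrs else [String.ofList [ch]]
      variants.flatMap (fun prefix_ => opts.map (fun opt => prefix_ ++ opt)))
    [""]

-- ===== PRECONDITION & SPEC =====
def Spec_vowelswaps (word : String) (out : List String) : Prop := out = vowelswaps_alt word
instance (word : String) (out : List String) : Decidable (Spec_vowelswaps word out) := by unfold Spec_vowelswaps; infer_instance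

-- ===== CLAIM (what is proved, stated in full; the proofs are below) =====
def Claim_equal_vowelswaps : Prop := ∀ (word : String), Dom_vowelswaps word → Spec_vowelswaps word (vowelswaps word)

-- ===== LEMMAS AND PROOFS =====

def pvOptA (c : Char) : List Char := if pyVowels.contains c then pyVowels else [c]

lemma pvOptsB_eq (c : Char) :
    (if pyVowels.contains c then vowelOptStrs else [String.ofList [c]])
      = (pvOptA c).map (fun x => String.ofList [x]) := by
  unfold pvOptA
  split_ifs with h
  · rfl
  · rfl

lemma pv_append_cons (p : String) (x : Char) (r : List Char) :
    p ++ String.ofList (x :: r) = (p ++ String.ofList [x]) ++ String.ofList r := by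
  rw [String.append_assoc, ← String.ofList_append]
  rfl

lemma pv_fold (cs : List Char) (acc : List String) :
    cs.foldl
      (fun variants ch =>
        let opts : List String :=
          if pyVowels.contains ch then vowelOptStrs else [String.ofList [ch]]
        variants.flatMap (fun prefix_ => opts.map (fun opt => prefix_ ++ opt))) acc
    = acc.flatMap (fun p => (pyProduct (cs.map pvOptA)).map (fun r => p ++ String.ofList r)) := by
  induction cs generalizing acc with
  | nil =>
    simp [pyProduct]
  | cons c cs ih =>
    rw [List.foldl_cons, ih]
    simp only [pvOptsB_eq, List.map_cons, pyProduct, List.flatMap_assoc, List.map_flatMap,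
      List.flatMap_map, List.map_map]
    congr 1; funext p
    congr 1; funext x
    congr 1; funext r
    exact (pv_append_cons p x r).symm

lemma pv_empty_append (r : List Char) : "" ++ String.ofList r = String.ofList r :=
  String.empty_append

lemma pv_alt_eq (word : String) :
    vowelswaps_alt word
      = (pyProduct (word.toList.map pvOptA)).map (fun r => "" ++ String.ofList r) := by
  unfold vowelswaps_alt
  rw [pv_fold]
  simp

-- ===== VERDICT (by name: the statement is the Claim_ definition above) =====
theorem vowelswaps_spec : Claim_equal_vowelswaps := by
  intro word _
  unfold Spec_vowelswaps
  rw [pv_alt_eq]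
  unfold vowelswaps
  simp only [pv_empty_append]
  rfl
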